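-- pv_equiv track=rewrite | github.com/Harmeet10000/AgentNexus-LangChain-FastAPI | src/app/shared/langgraph_layer/ingestion_kb/pipeline_node.py | _naturalize_tables
-- ===== SOURCE A (Python) =====
-- def _naturalize_tables(markdown: str) -> str:
--     lines = markdown.splitlines()
--     output: list[str] = []
--     index = 0
--     while index < len(lines):
--         line = lines[index]
--         if _is_table_line(line):
--             table: list[str] = []
--             while index < len(lines) and _is_table_line(lines[index]):
--                 table.append(lines[index])
--                 index += 1
--             output.extend(_table_to_sentences(table))
--             continue
--         output.append(line)
--         index += 1
--     return "\n".join(output)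
--
-- def _is_table_line(line: str) -> bool:
--     stripped = line.strip()
--     return stripped.startswith("|") and stripped.endswith("|")
--
-- def _table_to_sentences(lines: list[str]) -> list[str]:
--     rows = [
--         [cell.strip() for cell in line.strip().strip("|").split("|")]
--         for line in lines
--         if "---" not in line
--     ]
--     if not rows:
--         return []
--     headers = rows[0]
--     sentences: list[str] = []
--     for row_index, row in enumerate(rows[1:], start=1):
--         pairs = [
--             f"{headers[index]}: {value}"
--             for index, value in enumerate(row)
--             if index < len(headers) and value
--         ]
--         if pairs:
--             sentences.append(f"Table row {row_index}: {'; '.join(pairs)}.")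
--     return sentences
-- ===== SOURCE B (Python) =====
-- def _naturalize_tables(markdown: str) -> str:
--     output: list[str] = []
--     in_block = False
--     headers = None
--     row_index = 0
--     for line in markdown.splitlines():
--         if _is_table_line(line):
--             if not in_block:
--                 in_block, headers, row_index = True, None, 0
--             if "---" in line:
--                 continue
--             cells = [cell.strip() for cell in line.strip().strip("|").split("|")]
--             if headers is None:
--                 headers = cells
--             else:
--                 row_index += 1
--                 pairs = [
--                     f"{headers[i]}: {value}"
--                     for i, value in enumerate(cells)
--                     if i < len(headers) and value
--                 ]
--                 if pairs:
--                     output.append(f"Table row {row_index}: {'; '.join(pairs)}.")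
--         else:
--             in_block = False
--             output.append(line)
--     return "\n".join(output)
--
--
-- def _is_table_line(line: str) -> bool:
--     stripped = line.strip()
--     return stripped.startswith("|") and stripped.endswith("|")
-- ===== Notes on version B (the rewrite author's own statement) =====
-- stated objective: alternative
-- what changed: Replaces A's two-level scanner (outer index loop collecting each maximal table block into a list, then _table_to_sentences over the block) with a single streaming pass that keeps only (in_block, headers, row_index) state and emits each sentence as its row is read, never materialising a block and dropping the _table_to_sentences helper entirely.
import Mathlib
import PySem

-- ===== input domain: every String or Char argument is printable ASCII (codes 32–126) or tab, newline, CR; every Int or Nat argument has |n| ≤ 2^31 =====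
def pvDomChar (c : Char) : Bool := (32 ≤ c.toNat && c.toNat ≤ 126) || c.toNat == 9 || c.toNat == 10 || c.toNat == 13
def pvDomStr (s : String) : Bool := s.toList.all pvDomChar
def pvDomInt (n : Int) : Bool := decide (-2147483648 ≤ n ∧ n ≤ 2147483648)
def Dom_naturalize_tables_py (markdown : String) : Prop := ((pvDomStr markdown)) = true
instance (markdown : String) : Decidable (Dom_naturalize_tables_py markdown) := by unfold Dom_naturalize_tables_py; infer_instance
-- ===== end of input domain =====

-- B replaces A's two-level block-collecting scanner (outer index loop + inner table-run
-- collector + _table_to_sentences over each materialised block) with a single streaming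
-- pass holding only (in_block, headers, row_index) state, emitting each sentence as the
-- row is read (objective: alternative decomposition; same O(n) cost).

-- ===== PORT A =====
-- helper: _is_table_line (identical in Source A and Source B)
def isTableLine (line : String) : Bool :=
  let stripped := PySem.Str.strip line
  PySem.Str.startswith stripped "|" && PySem.Str.endswith stripped "|"

-- the cell-splitting expression, written identically in Source A and Source B
def parseCells (l : String) : List String :=
  ((PySem.Str.split? (PySem.Str.stripChars (PySem.Str.strip l) "|") "|").getD []).map PySem.Str.strip

-- the pair-building comprehension, written identically in Source A and Source B
def pairsOf (headers row : List String) : List String :=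
  ((PySem.List.enumerate row 0).filter
      (fun iv => decide (iv.1 < (headers.length : Int)) && !(iv.2 == ""))).map
    (fun iv => PySem.List.pyGetD headers iv.1 "" ++ ": " ++ iv.2)

-- A's helper: _table_to_sentences
def tableToSentences (lines : List String) : List String :=
  let rows := (lines.filter (fun l => !(PySem.Str.isIn "---" l))).map parseCells
  match rows with
  | [] => []
  | headers :: rest =>
    (PySem.List.enumerate rest 1).foldl (fun sentences rr =>
      let pairs := pairsOf headers rr.2
      if pairs ≠ [] then
        sentences ++ ["Table row " ++ PySem.Int.toStr rr.1 ++ ": " ++ PySem.Str.join "; " pairs ++ "."]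
      else sentences) []

-- A's inner 'while index < len(lines) and _is_table_line(lines[index])' collector
def takeTable : List String → List String × List String
  | [] => ([], [])
  | l :: rest =>
    if isTableLine l then
      let tr := takeTable rest
      (l :: tr.1, tr.2)
    else ([], l :: rest)

theorem takeTable_snd_length_le (xs : List String) : (takeTable xs).2.length ≤ xs.length := by
  induction xs with
  | nil => simp [takeTable]
  | cons l rest ih =>
    simp only [takeTable]
    split
    · exact Nat.le_succ_of_le ih
    · simp

-- A's outer while loop over the line index
def scanA : List String → List String
  | [] => []
  | l :: rest =>
    if isTableLine l then
      let tr := takeTable rest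
      tableToSentences (l :: tr.1) ++ scanA tr.2
    else l :: scanA rest
termination_by xs => xs.length
decreasing_by
  · exact Nat.lt_succ_of_le (takeTable_snd_length_le rest)
  · simp

def naturalize_tables_py (markdown : String) : String :=
  PySem.Str.join "\n" (scanA (PySem.Str.splitlines markdown))

-- ===== PORT B =====
-- state = (output, in_block, headers, row_index); one loop iteration of Source B
def stepB (st : List String × Bool × Option (List String) × Int) (line : String) :
    List String × Bool × Option (List String) × Int :=
  let out := st.1
  if isTableLine line then
    let hr := if st.2.1 then (st.2.2.1, st.2.2.2) else ((none : Option (List String)), (0 : Int))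
    if PySem.Str.isIn "---" line then (out, true, hr.1, hr.2)
    else
      let cells := parseCells line
      match hr.1 with
      | none => (out, true, some cells, hr.2)
      | some h =>
        let ri := hr.2 + 1
        let ps := pairsOf h cells
        ((if ps ≠ [] then
            out ++ ["Table row " ++ PySem.Int.toStr ri ++ ": " ++ PySem.Str.join "; " ps ++ "."]
          else out), true, some h, ri)
  else (out ++ [line], false, st.2.2.1, st.2.2.2)

def naturalize_tables_py_alt (markdown : String) : String :=
  PySem.Str.join "\n"
    (((PySem.Str.splitlines markdown).foldl stepB ([], false, none, 0)).1)

-- ===== PRECONDITION & SPEC =====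
def Spec_naturalize_tables_py (markdown : String) (out : String) : Prop := out = naturalize_tables_py_alt markdown
instance (markdown : String) (out : String) : Decidable (Spec_naturalize_tables_py markdown out) := by unfold Spec_naturalize_tables_py; infer_instance

-- ===== CLAIM =====
def Claim_equal_naturalize_tables_py : Prop := ∀ (markdown : String), Dom_naturalize_tables_py markdown → Spec_naturalize_tables_py markdown (naturalize_tables_py markdown)

-- ===== LEMMAS AND PROOFS =====

def rowsOf (ls : List String) : List (List String) :=
  (ls.filter (fun l => !(PySem.Str.isIn "---" l))).map parseCells

-- the sentences produced from rows rs when the row counter currently reads n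
def sentFrom (h : List String) (n : Int) : List (List String) → List String
  | [] => []
  | r :: rs =>
    (if pairsOf h r ≠ [] then
        ["Table row " ++ PySem.Int.toStr (n+1) ++ ": " ++ PySem.Str.join "; " (pairsOf h r) ++ "."]
      else []) ++ sentFrom h (n+1) rs

theorem foldl_sentFrom (h : List String) :
    ∀ (rs : List (List String)) (n : Int) (acc : List String),
    (PySem.List.enumerate rs (n+1)).foldl (fun sentences rr =>
        let pairs := pairsOf h rr.2
        if pairs ≠ [] then
          sentences ++ ["Table row " ++ PySem.Int.toStr rr.1 ++ ": " ++ PySem.Str.join "; " pairs ++ "."]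
        else sentences) acc
      = acc ++ sentFrom h n rs := by
  intro rs
  induction rs with
  | nil => intro n acc; simp [PySem.List.enumerate_nil, sentFrom]
  | cons r rs ih =>
    intro n acc
    rw [PySem.List.enumerate_cons, List.foldl_cons, sentFrom]
    rw [ih (n+1)]
    by_cases hp : pairsOf h r ≠ [] <;> simp [hp]

theorem tableToSentences_eq (ls : List String) :
    tableToSentences ls
      = (match rowsOf ls with
         | [] => []
         | h :: rest => sentFrom h 0 rest) := by
  unfold tableToSentences rowsOf
  cases hr : (ls.filter (fun l => !(PySem.Str.isIn "---" l))).map parseCells with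
  | nil => simp
  | cons h rest =>
    simp only []
    have := foldl_sentFrom h rest 0 []
    simpa using this

theorem dashChars (t : String) :
    PySem.Chars.isIn ['-','-','-'] t.toList = PySem.Str.isIn "---" t := rfl

theorem rowsOf_cons_of_dash (t : String) (ts : List String)
    (hd : PySem.Str.isIn "---" t = true) : rowsOf (t :: ts) = rowsOf ts := by
  have hdc : PySem.Chars.isIn ['-','-','-'] t.toList = true := (dashChars t).trans hd
  unfold rowsOf
  rw [List.filter_cons]
  simp [hdc]

theorem rowsOf_cons_of_not_dash (t : String) (ts : List String)
    (hd : PySem.Str.isIn "---" t = false) :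
    rowsOf (t :: ts) = parseCells t :: rowsOf ts := by
  have hdc : PySem.Chars.isIn ['-','-','-'] t.toList = false := (dashChars t).trans hd
  unfold rowsOf
  rw [List.filter_cons]
  simp [hdc]

theorem blockKnown :
    ∀ (ts : List String), (∀ l ∈ ts, isTableLine l = true) →
    ∀ (acc : List String) (h : List String) (n : Int),
    ts.foldl stepB (acc, true, some h, n)
      = (acc ++ sentFrom h n (rowsOf ts), true, some h, n + (rowsOf ts).length) := by
  intro ts
  induction ts with
  | nil => intro _ acc h n; simp [rowsOf, sentFrom]
  | cons t ts ih =>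
    intro hall acc h n
    have ht : isTableLine t = true := hall t (by simp)
    have hall' : ∀ l ∈ ts, isTableLine l = true := fun l hl => hall l (by simp [hl])
    rw [List.foldl_cons]
    by_cases hd : PySem.Str.isIn "---" t = true
    · have hdc : PySem.Chars.isIn ['-','-','-'] t.toList = true := (dashChars t).trans hd
      have hstep : stepB (acc, true, some h, n) t = (acc, true, some h, n) := by
        simp [stepB, ht, hdc]
      rw [hstep, ih hall', rowsOf_cons_of_dash t ts hd]
    · have hd' : PySem.Str.isIn "---" t = false := by simpa using hd
      have hdc : PySem.Chars.isIn ['-','-','-'] t.toList = false := (dashChars t).trans hd'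
      have hstep : stepB (acc, true, some h, n) t
          = ((if pairsOf h (parseCells t) ≠ [] then
                acc ++ ["Table row " ++ PySem.Int.toStr (n+1) ++ ": " ++ PySem.Str.join "; " (pairsOf h (parseCells t)) ++ "."]
              else acc), true, some h, n + 1) := by
        simp [stepB, ht, hdc]
      rw [hstep, ih hall', rowsOf_cons_of_not_dash t ts hd']
      rw [sentFrom]
      refine Prod.ext ?_ (Prod.ext rfl (Prod.ext rfl ?_))
      · by_cases hp : pairsOf h (parseCells t) ≠ []
        · rw [if_pos hp, if_pos hp]; simp
        · rw [if_neg hp, if_neg hp]; simp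
      · show (n + 1) + ((rowsOf ts).length : Int) = n + (((rowsOf ts).length + 1 : Nat) : Int)
        push_cast; ring

theorem blockFresh :
    ∀ (ts : List String), (∀ l ∈ ts, isTableLine l = true) →
    ∀ (acc : List String),
    ∃ (H : Option (List String)) (N : Int),
    ts.foldl stepB (acc, true, none, 0) = (acc ++ tableToSentences ts, true, H, N) := by
  intro ts
  induction ts with
  | nil => intro _ acc; exact ⟨none, 0, by simp [tableToSentences_eq, rowsOf]⟩
  | cons t ts ih =>
    intro hall acc
    have ht : isTableLine t = true := hall t (by simp)
    have hall' : ∀ l ∈ ts, isTableLine l = true := fun l hl => hall l (by simp [hl])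
    rw [List.foldl_cons]
    by_cases hd : PySem.Str.isIn "---" t = true
    · have hdc : PySem.Chars.isIn ['-','-','-'] t.toList = true := (dashChars t).trans hd
      have hstep : stepB (acc, true, none, 0) t = (acc, true, none, 0) := by
        simp [stepB, ht, hdc]
      rw [hstep]
      obtain ⟨H, N, hE⟩ := ih hall' acc
      refine ⟨H, N, ?_⟩
      rw [hE]
      have hteq : tableToSentences (t :: ts) = tableToSentences ts := by
        rw [tableToSentences_eq, tableToSentences_eq, rowsOf_cons_of_dash t ts hd]
      rw [hteq]
    · have hd' : PySem.Str.isIn "---" t = false := by simpa using hd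
      have hdc : PySem.Chars.isIn ['-','-','-'] t.toList = false := (dashChars t).trans hd'
      have hstep : stepB (acc, true, none, 0) t = (acc, true, some (parseCells t), 0) := by
        simp [stepB, ht, hdc]
      rw [hstep, blockKnown ts hall' acc (parseCells t) 0]
      refine ⟨some (parseCells t), 0 + (rowsOf ts).length, ?_⟩
      rw [tableToSentences_eq, rowsOf_cons_of_not_dash t ts hd']

theorem takeTable_split (xs : List String) : (takeTable xs).1 ++ (takeTable xs).2 = xs := by
  induction xs with
  | nil => simp [takeTable]
  | cons l rest ih =>
    simp only [takeTable]
    split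
    · simpa using ih
    · simp

theorem takeTable_all (xs : List String) : ∀ l ∈ (takeTable xs).1, isTableLine l = true := by
  induction xs with
  | nil => simp [takeTable]
  | cons x rest ih =>
    by_cases hx : isTableLine x = true
    · simp only [takeTable, hx, if_pos]
      intro l hl
      rcases List.mem_cons.mp hl with h | h
      · exact h ▸ hx
      · exact ih l h
    · simp [takeTable, hx]

theorem takeTable_snd_head (xs : List String) :
    (takeTable xs).2 = [] ∨ ∃ h t, (takeTable xs).2 = h :: t ∧ isTableLine h = false := by
  induction xs with
  | nil => left; simp [takeTable]
  | cons x rest ih =>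
    by_cases hx : isTableLine x = true
    · simpa [takeTable, hx] using ih
    · right; exact ⟨x, rest, by simp [takeTable, hx], by simpa using hx⟩

theorem mainLoop :
    ∀ (n : Nat) (xs : List String), xs.length ≤ n →
    ∀ (acc : List String) (H : Option (List String)) (N : Int),
    (xs.foldl stepB (acc, false, H, N)).1 = acc ++ scanA xs := by
  intro n
  induction n with
  | zero =>
    intro xs hlen acc H N
    have : xs = [] := List.length_eq_zero_iff.mp (Nat.le_zero.mp hlen)
    subst this; simp [scanA]
  | succ n ih =>
    intro xs hlen acc H N
    cases xs with
    | nil => simp [scanA]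
    | cons l rest =>
      by_cases hl : isTableLine l = true
      · -- fold from the false state equals fold from the fresh true state
        have hstep : stepB (acc, false, H, N) l = stepB (acc, true, none, 0) l := by
          simp [stepB, hl]
        rw [List.foldl_cons, hstep, ← List.foldl_cons]
        have hsplit : l :: rest = (l :: (takeTable rest).1) ++ (takeTable rest).2 := by
          simpa using (takeTable_split rest).symm
        have hall : ∀ x ∈ l :: (takeTable rest).1, isTableLine x = true := by
          intro x hx
          rcases List.mem_cons.mp hx with h | h
          · exact h ▸ hl
          · exact takeTable_all rest x h
        obtain ⟨H', N', hB⟩ := blockFresh (l :: (takeTable rest).1) hall acc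
        conv_lhs => rw [hsplit]
        rw [List.foldl_append, hB]
        have hscan : scanA (l :: rest)
            = tableToSentences (l :: (takeTable rest).1) ++ scanA (takeTable rest).2 := by
          rw [scanA]; simp [hl]
        rw [hscan]
        rcases takeTable_snd_head rest with h2 | ⟨h, t, h2, hh⟩
        · rw [h2]; simp [scanA]
        · rw [h2, List.foldl_cons]
          have hstep2 : stepB (acc ++ tableToSentences (l :: (takeTable rest).1), true, H', N') h
              = (acc ++ tableToSentences (l :: (takeTable rest).1) ++ [h], false, H', N') := by
            simp [stepB, hh]
          rw [hstep2]
          have htlen : t.length ≤ n := by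
            have h1 : (takeTable rest).2.length ≤ rest.length := takeTable_snd_length_le rest
            have h2' : t.length < (takeTable rest).2.length := by rw [h2]; simp
            have h3 : rest.length ≤ n := Nat.le_of_succ_le_succ (by simpa using hlen)
            omega
          rw [ih t htlen _ H' N']
          rw [scanA]
          simp [hh]
      · have hl' : isTableLine l = false := by simpa using hl
        rw [List.foldl_cons]
        have hstep : stepB (acc, false, H, N) l = (acc ++ [l], false, H, N) := by
          simp [stepB, hl']
        rw [hstep]
        have hrlen : rest.length ≤ n := Nat.le_of_succ_le_succ (by simpa using hlen)
        rw [ih rest hrlen _ H N, scanA]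
        simp [hl']

-- ===== VERDICT =====
theorem naturalize_tables_py_spec : Claim_equal_naturalize_tables_py := by
  intro markdown _
  unfold Spec_naturalize_tables_py naturalize_tables_py naturalize_tables_py_alt
  rw [mainLoop (PySem.Str.splitlines markdown).length _ le_rfl]
  rfl
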